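-- pv_equiv track=rewrite | github.com/Tim-Leon/igg-games-scraper | igg_games.py | bluemediafiles_decodeKey
-- ===== SOURCE A (Python) =====
-- def bluemediafiles_decodeKey(encoded: str):
--     key = ''
--     i = int(len(encoded) / 2 - 5)
--     # i = i - 2
--     while i >= 0:
--         key += encoded[i]
--         i = i - 2
--     i = int(len(encoded) / 2 + 4)
--     # i = i - 2
--     while i < len(encoded):
--         key += encoded[i]
--         i = i + 2
--     return key
-- ===== SOURCE B (Python) =====
-- def bluemediafiles_decodeKey(encoded: str):
--     n = len(encoded)
--     s1 = n // 2 - 5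
--     first = encoded[s1::-2] if s1 >= 0 else ''
--     return first + encoded[n // 2 + 4::2]
-- ===== Notes on version B (the rewrite author's own statement) =====
-- stated objective: idiomatic
-- what changed: Two character-appending while loops with a manual index are replaced by two extended slices (encoded[s1::-2] guarded for negative start, plus encoded[n//2+4::2]) using integer floor division instead of float truncation.
-- intended difference: On strings of length exactly 9, A's int(len/2-5) truncates -0.5 toward zero to 0 so A returns encoded[0]+encoded[8], while B's floor division gives -1 and B returns just encoded[8]; floor division is the intended index arithmetic and the extra leading character is a float-truncation artefact. — e.g. on bluemediafiles_decodeKey("abcdefghi"): A returns "ai", B returns "i"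
import Mathlib
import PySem

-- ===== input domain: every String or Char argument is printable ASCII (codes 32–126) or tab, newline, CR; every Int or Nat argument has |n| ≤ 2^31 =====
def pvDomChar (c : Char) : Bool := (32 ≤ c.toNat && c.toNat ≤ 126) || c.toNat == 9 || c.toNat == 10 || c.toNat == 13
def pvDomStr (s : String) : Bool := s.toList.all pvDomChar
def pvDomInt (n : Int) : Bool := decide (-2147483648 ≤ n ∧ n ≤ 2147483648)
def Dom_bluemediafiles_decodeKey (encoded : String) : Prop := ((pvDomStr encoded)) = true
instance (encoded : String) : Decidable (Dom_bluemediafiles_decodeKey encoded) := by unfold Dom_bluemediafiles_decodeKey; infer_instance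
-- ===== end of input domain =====

-- B replaces A's two index-stepping while loops by two extended slices (the first guarded for a
-- negative start) computed with floor division; same O(n) cost, idiomatic form.

-- ===== PORT A =====
-- first while loop: while i >= 0: key += encoded[i]; i -= 2   (the index is always in range there, so pyGetD's default is never used)
def pvLoopDown (cs : List Char) (i : Int) (key : List Char) : List Char :=
  if 0 ≤ i then pvLoopDown cs (i - 2) (key ++ [PySem.List.pyGetD cs i ' ']) else key
termination_by (i + 1).toNat
decreasing_by omega

-- second while loop: while i < len(encoded): key += encoded[i]; i += 2
def pvLoopUp (cs : List Char) (i : Int) (key : List Char) : List Char :=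
  if i < (cs.length : Int) then pvLoopUp cs (i + 2) (key ++ [PySem.List.pyGetD cs i ' ']) else key
termination_by ((cs.length : Int) - i).toNat
decreasing_by omega

-- int(len(encoded)/2 - 5) and int(len(encoded)/2 + 4): the float halves are exact on Dom, and
-- int() truncates toward zero, i.e. Int.tdiv of (len - 10) resp. (len + 8) by 2.
def bluemediafiles_decodeKey (encoded : String) : String :=
  let cs := encoded.toList
  let n : Int := (cs.length : Int)
  String.ofList (pvLoopUp cs ((n + 8).tdiv 2) (pvLoopDown cs ((n - 10).tdiv 2) []))

-- ===== PORT B =====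
-- Source B: s1 = n // 2 - 5; first = encoded[s1::-2] if s1 >= 0 else ''; return first + encoded[n//2+4::2]
-- (string concatenation ported as list append under String.ofList; the slices never fail: step ≠ 0)
def bluemediafiles_decodeKey_alt (encoded : String) : String :=
  let cs := encoded.toList
  let n : Int := (cs.length : Int)
  let s1 : Int := PySem.Int.floordiv n 2 - 5
  let first : List Char := if 0 ≤ s1 then (PySem.List.slice? cs (some s1) none (-2)).getD [] else []
  let second : List Char := (PySem.List.slice? cs (some (PySem.Int.floordiv n 2 + 4)) none 2).getD []
  String.ofList (first ++ second)

-- ===== PRECONDITION & SPEC =====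
-- On strings of length exactly 9, A's int(len/2-5) truncates -0.5 toward zero to 0, so A returns
-- encoded[0]+encoded[8], while B's floor division gives -1 and B returns just encoded[8]; floor
-- division is the intended index arithmetic and A's extra leading character is a float-truncation artefact.
def D_bluemediafiles_decodeKey (encoded : String) : Prop := encoded.toList.length = 9
instance (encoded : String) : Decidable (D_bluemediafiles_decodeKey encoded) := by unfold D_bluemediafiles_decodeKey; infer_instance

def Spec_bluemediafiles_decodeKey (encoded : String) (out : String) : Prop :=
  ¬ D_bluemediafiles_decodeKey encoded → out = bluemediafiles_decodeKey_alt encoded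
instance (encoded : String) (out : String) : Decidable (Spec_bluemediafiles_decodeKey encoded out) := by unfold Spec_bluemediafiles_decodeKey; infer_instance

def pvDiffWitness_bluemediafiles_decodeKey : String := "abcdefghi"
def pvDiffWitnessOut_bluemediafiles_decodeKey : String × String := ("ai", "i")

-- ===== CLAIM =====
def Claim_unchanged_bluemediafiles_decodeKey : Prop := ∀ (encoded : String), Dom_bluemediafiles_decodeKey encoded → Spec_bluemediafiles_decodeKey encoded (bluemediafiles_decodeKey encoded)
def Claim_changed_bluemediafiles_decodeKey : Prop := Dom_bluemediafiles_decodeKey (pvDiffWitness_bluemediafiles_decodeKey) ∧ D_bluemediafiles_decodeKey (pvDiffWitness_bluemediafiles_decodeKey) ∧ bluemediafiles_decodeKey (pvDiffWitness_bluemediafiles_decodeKey) = pvDiffWitnessOut_bluemediafiles_decodeKey.1 ∧ bluemediafiles_decodeKey_alt (pvDiffWitness_bluemediafiles_decodeKey) = pvDiffWitnessOut_bluemediafiles_decodeKey.2 ∧ pvDiffWitnessOut_bluemediafiles_decodeKey.1 ≠ pvDiffWitnessOut_bluemediafiles_decodeKey.2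
def Claim_exact_bluemediafiles_decodeKey : Prop := ∀ (encoded : String), Dom_bluemediafiles_decodeKey encoded → D_bluemediafiles_decodeKey encoded → bluemediafiles_decodeKey encoded ≠ bluemediafiles_decodeKey_alt encoded

-- ===== LEMMAS AND PROOFS =====

-- the characters A's first loop collects, starting at i and stepping down by 2
def gDown (cs : List Char) (i : Int) : List Char :=
  if 0 ≤ i then PySem.List.pyGetD cs i ' ' :: gDown cs (i - 2) else []
termination_by (i + 1).toNat
decreasing_by omega

-- the characters A's second loop collects, starting at i and stepping up by 2
def gUp (cs : List Char) (i : Int) : List Char :=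
  if i < (cs.length : Int) then PySem.List.pyGetD cs i ' ' :: gUp cs (i + 2) else []
termination_by ((cs.length : Int) - i).toNat
decreasing_by omega

theorem pvLoopDown_eq (cs : List Char) (i : Int) (key : List Char) :
    pvLoopDown cs i key = key ++ gDown cs i := by
  fun_induction pvLoopDown cs i key with
  | case1 i key h ih => rw [gDown, if_pos h, ih]; simp
  | case2 i key h => rw [gDown, if_neg h]; simp

theorem pvLoopUp_eq (cs : List Char) (i : Int) (key : List Char) :
    pvLoopUp cs i key = key ++ gUp cs i := by
  fun_induction pvLoopUp cs i key with
  | case1 i key h ih => rw [gUp, if_pos h, ih]; simp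
  | case2 i key h => rw [gUp, if_neg h]; simp

theorem filterDown (cs : List Char) (s : Int) (h0 : 0 ≤ s) (h1 : s < (cs.length : Int)) :
    List.filterMap (fun k : Nat => cs[(s + -2 * (k : Int)).toNat]?) (List.range ((s + 2) / 2).toNat)
      = gDown cs s := by
  induction hn : (s + 1).toNat using Nat.strong_induction_on generalizing s with
  | _ n ih =>
  have hlt : s.toNat < cs.length := by omega
  have hc : ((s + 2) / 2).toNat = (s / 2).toNat + 1 := by omega
  have hidx : (s + -2 * ((0:Nat) : Int)).toNat = s.toNat := by omega
  have hhead : cs[(s + -2 * ((0:Nat) : Int)).toNat]? = some (cs[s.toNat]'hlt) := by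
    rw [hidx, List.getElem?_eq_getElem hlt]
  have hfun : ((fun k : Nat => cs[(s + -2 * (k : Int)).toNat]?) ∘ Nat.succ)
      = fun k : Nat => cs[(s - 2 + -2 * (k : Int)).toNat]? := by
    funext k; simp only [Function.comp]; congr 2; push_cast; ring
  simp only [hc, List.range_succ_eq_map, List.filterMap_cons, hhead, List.filterMap_map, hfun]
  rw [gDown, if_pos h0]
  congr 1
  · rw [PySem.List.pyGetD_eq_getElem cs ' ' h0 h1]
  · by_cases h2 : 0 ≤ s - 2
    · have := ih (s - 2 + 1).toNat (by omega) (s - 2) h2 (by omega) rfl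
      rw [show (s / 2).toNat = ((s - 2 + 2) / 2).toNat by omega]
      exact this
    · have hz : (s / 2).toNat = 0 := by omega
      rw [hz, gDown, if_neg h2]
      simp

theorem filterUp (cs : List Char) (s : Int) (h0 : 0 ≤ s) :
    List.filterMap (fun k : Nat => cs[(s + 2 * (k : Int)).toNat]?)
      (List.range (if s < (cs.length : Int) then (((cs.length : Int) - s + 2 - 1) / 2).toNat else 0))
      = gUp cs s := by
  induction hn : ((cs.length : Int) - s).toNat using Nat.strong_induction_on generalizing s with
  | _ n ih =>
  by_cases hlt : s < (cs.length : Int)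
  · have hltn : s.toNat < cs.length := by omega
    have hc : (((cs.length : Int) - s + 2 - 1) / 2).toNat
        = (if s + 2 < (cs.length : Int) then (((cs.length : Int) - (s + 2) + 2 - 1) / 2).toNat else 0) + 1 := by
      split <;> omega
    have hidx : (s + 2 * ((0:Nat) : Int)).toNat = s.toNat := by omega
    have hhead : cs[(s + 2 * ((0:Nat) : Int)).toNat]? = some (cs[s.toNat]'hltn) := by
      rw [hidx, List.getElem?_eq_getElem hltn]
    have hfun : ((fun k : Nat => cs[(s + 2 * (k : Int)).toNat]?) ∘ Nat.succ)
        = fun k : Nat => cs[(s + 2 + 2 * (k : Int)).toNat]? := by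
      funext k; simp only [Function.comp]; congr 2; push_cast; ring
    rw [if_pos hlt, hc, List.range_succ_eq_map]
    simp only [List.filterMap_cons, hhead, List.filterMap_map, hfun]
    rw [gUp, if_pos hlt]
    congr 1
    · rw [PySem.List.pyGetD_eq_getElem cs ' ' h0 hlt]
    · exact ih ((cs.length : Int) - (s + 2)).toNat (by omega) (s + 2) (by omega) rfl
  · rw [if_neg hlt, gUp, if_neg hlt]
    simp

theorem sliceDown (cs : List Char) (s : Int) (h0 : 0 ≤ s) (h1 : s < (cs.length : Int)) :
    PySem.List.slice? cs (some s) none (-2) = some (gDown cs s) := by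
  simp only [PySem.List.slice?, PySem.List.sliceIndices]
  norm_num
  have hclamp : (if s < 0 then max (s + (cs.length : Int)) (-1) else min s ((cs.length : Int) - 1)) = s := by
    rw [if_neg (by omega)]; omega
  rw [hclamp, if_pos (by omega : (-1:Int) < s)]
  have hnum : (s + 1 + 2 - 1) = s + 2 := by ring
  have hfun : (fun x : Nat => cs[(s + -(2 * (x : Int))).toNat]?)
      = fun k : Nat => cs[(s + -2 * (k : Int)).toNat]? := by
    funext k; congr 2
  rw [hnum, hfun]
  exact filterDown cs s h0 h1

theorem sliceUp (cs : List Char) (s : Int) (h0 : 0 ≤ s) :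
    PySem.List.slice? cs (some s) none 2 = some (gUp cs s) := by
  simp only [PySem.List.slice?, PySem.List.sliceIndices]
  norm_num
  by_cases hle : s ≤ (cs.length : Int)
  · have hclamp : (if s < 0 then max (s + (cs.length : Int)) 0 else min s (cs.length : Int)) = s := by
      rw [if_neg (by omega)]; omega
    rw [hclamp]
    exact filterUp cs s h0
  · have hclamp : (if s < 0 then max (s + (cs.length : Int)) 0 else min s (cs.length : Int))
        = (cs.length : Int) := by rw [if_neg (by omega)]; omega
    rw [hclamp, if_neg (by omega : ¬ ((cs.length : Int) < (cs.length : Int)))]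
    rw [gUp, if_neg (by omega)]
    simp

-- ===== VERDICT =====
theorem bluemediafiles_decodeKey_spec : Claim_unchanged_bluemediafiles_decodeKey := by
  intro enc _ hnd
  have hn9 : enc.toList.length ≠ 9 := hnd
  simp only [bluemediafiles_decodeKey, bluemediafiles_decodeKey_alt]
  refine congrArg String.ofList ?_
  rw [pvLoopUp_eq, pvLoopDown_eq, List.nil_append]
  set cs := enc.toList with hcs
  set N : Int := (cs.length : Int) with hN
  have hf : PySem.Int.floordiv N 2 = N / 2 := PySem.Int.floordiv_eq_ediv_of_pos (by norm_num)
  have hup : (N + 8).tdiv 2 = N / 2 + 4 := by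
    rw [Int.tdiv_eq_ediv_of_nonneg (by omega)]; omega
  rw [hf, hup, sliceUp cs (N / 2 + 4) (by omega)]
  simp only [Option.getD_some]
  by_cases h10 : 10 ≤ N
  · have hdown : (N - 10).tdiv 2 = N / 2 - 5 := by
      rw [Int.tdiv_eq_ediv_of_nonneg (by omega)]; omega
    rw [hdown, if_pos (by omega : (0:Int) ≤ N / 2 - 5),
        sliceDown cs (N / 2 - 5) (by omega) (by omega)]
    simp only [Option.getD_some]
  · have hdneg : (N - 10).tdiv 2 < 0 := by
      rw [show N - 10 = -(10 - N) by ring, Int.neg_tdiv,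
          Int.tdiv_eq_ediv_of_nonneg (by omega)]
      omega
    rw [gDown, if_neg (by omega), if_neg (by omega : ¬ (0:Int) ≤ N / 2 - 5)]

theorem bluemediafiles_decodeKey_changed : Claim_changed_bluemediafiles_decodeKey := by
  unfold Claim_changed_bluemediafiles_decodeKey
  refine ⟨by decide, by decide, ?_, by decide, ?_⟩
  · show bluemediafiles_decodeKey "abcdefghi" = "ai"
    simp only [bluemediafiles_decodeKey]
    rw [pvLoopDown]; norm_num
    rw [pvLoopDown]; norm_num
    rw [pvLoopUp]; norm_num
    rw [pvLoopUp]; norm_num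
    decide
  · intro h
    exact absurd (congrArg String.toList h) (by decide)

theorem bluemediafiles_decodeKey_tight : Claim_exact_bluemediafiles_decodeKey := by
  intro enc _ h9 h
  simp only [bluemediafiles_decodeKey, bluemediafiles_decodeKey_alt] at h
  have h' := congrArg String.toList h
  rw [String.toList_ofList, String.toList_ofList] at h'
  rw [pvLoopUp_eq, pvLoopDown_eq, List.nil_append] at h'
  have hlist := congrArg List.length h'
  set cs := enc.toList with hcs
  have hN : (cs.length : Int) = 9 := by exact_mod_cast h9
  rw [hN] at hlist
  rw [show ((9:Int) - 10).tdiv 2 = 0 by decide, show ((9:Int) + 8).tdiv 2 = 8 by decide,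
      show PySem.Int.floordiv 9 2 - 5 = -1 by decide,
      if_neg (by decide : ¬ (0:Int) ≤ -1)] at hlist
  rw [show PySem.Int.floordiv (9:Int) 2 + 4 = 8 by decide] at hlist
  have hn9 : cs.length = 9 := h9
  have hslice : PySem.List.slice? cs (some 8) none 2 = some (gUp cs 8) := sliceUp cs 8 (by omega)
  rw [hslice] at hlist
  simp only [Option.getD_some, List.length_append, List.nil_append] at hlist
  have hg : gDown cs 0 = [PySem.List.pyGetD cs 0 ' '] := by
    rw [gDown, if_pos le_rfl, gDown, if_neg (by norm_num)]
  rw [hg] at hlist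
  simp at hlist
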